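-- pv_equiv track=rewrite | github.com/0425-jo/mother-sound | experiment_app.py | extract_vowels
-- ===== SOURCE A (Python) =====
-- def extract_vowels(word):
--     vowels = "aiueo"
--     result = []
--     i = 0
--     while i < len(word):
--         if word[i] == "n":
--             count = 1
--             while i + count < len(word) and word[i + count] == "n":
--                 count += 1
--             result.append("u" * (count // 2))
--             i += count
--             continue
--         if word[i] == "-":
--             result.append(result[-1] if result else "")
--             i += 1
--             continue
--         if word[i] in vowels:
--             result.append(word[i])
--         i += 1
--     return "".join(result)
-- ===== SOURCE B (Python) =====
-- from itertools import groupby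
--
-- def extract_vowels(word):
--     result = []
--     for ch, run in groupby(word):
--         n = sum(1 for _ in run)
--         if ch == "n":
--             result.append("u" * (n // 2))
--         elif ch == "-":
--             for _ in range(n):
--                 result.append(result[-1] if result else "")
--         elif ch in "aiueo":
--             for _ in range(n):
--                 result.append(ch)
--     return "".join(result)
-- ===== Notes on version B (the rewrite author's own statement) =====
-- stated objective: idiomatic
-- what changed: Replaces A's index-based while loop with its hand-rolled inner run-counting loop by a single pass over (char, run-length) groups from itertools.groupby, dispatching once per run.
import Mathlib
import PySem

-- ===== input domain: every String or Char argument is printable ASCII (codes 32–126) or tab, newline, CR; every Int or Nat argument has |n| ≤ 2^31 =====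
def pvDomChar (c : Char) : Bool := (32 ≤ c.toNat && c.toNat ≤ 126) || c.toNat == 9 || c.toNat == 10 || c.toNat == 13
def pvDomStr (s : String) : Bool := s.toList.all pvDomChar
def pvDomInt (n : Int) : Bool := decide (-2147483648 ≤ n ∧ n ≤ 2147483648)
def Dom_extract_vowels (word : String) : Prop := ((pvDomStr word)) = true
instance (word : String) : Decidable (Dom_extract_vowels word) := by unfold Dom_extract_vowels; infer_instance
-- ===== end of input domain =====

-- B replaces A's index-based while loop (with its hand-rolled inner run-counting loop) by a
-- single pass over (char, run-length) groups à la itertools.groupby — objective: idiomatic.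

-- ===== PORT A =====
-- A's while loop over index i, ported as recursion on the remaining characters; the inner
-- `while … == "n"` counting loop is the length of the leading 'n'-run of the rest
-- (takeWhile), and `i += count` drops exactly that run (dropWhile). Pieces are kept as
-- List Char; `"".join(result)` is PySem.Chars.join [].
def extract_vowels_go : List Char → List (List Char) → List (List Char)
  | [], result => result
  | c :: rest, result =>
    if c = 'n' then
      let count := 1 + (rest.takeWhile (· = 'n')).length
      extract_vowels_go (rest.dropWhile (· = 'n')) (result ++ [List.replicate (count / 2) 'u'])
    else if c = '-' then
      extract_vowels_go rest (result ++ [(result.getLast?).getD []])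
    else if c ∈ "aiueo".toList then
      extract_vowels_go rest (result ++ [[c]])
    else
      extract_vowels_go rest result
termination_by l => l.length
decreasing_by
  · simpa using Nat.lt_succ_of_le (List.length_dropWhile_le _ _)
  all_goals simp

def extract_vowels (word : String) : String :=
  String.mk (PySem.Chars.join [] (extract_vowels_go word.toList []))

-- ===== PORT B =====
-- itertools.groupby(word): maximal runs of equal characters as (char, length) pairs.
def pvGroupby : List Char → List (Char × Nat)
  | [] => []
  | c :: rest =>
      (c, 1 + (rest.takeWhile (· = c)).length) :: pvGroupby (rest.dropWhile (· = c))
termination_by l => l.length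
decreasing_by simpa using Nat.lt_succ_of_le (List.length_dropWhile_le _ _)

-- `for _ in range(n): result.append(result[-1] if result else '')`
def pvDashLoop : List (List Char) → Nat → List (List Char)
  | result, 0 => result
  | result, k + 1 => pvDashLoop (result ++ [(result.getLast?).getD []]) k

-- `for _ in range(n): result.append(ch)`
def pvVowelLoop (c : Char) : List (List Char) → Nat → List (List Char)
  | result, 0 => result
  | result, k + 1 => pvVowelLoop c (result ++ [[c]]) k

def pvStepB (result : List (List Char)) (g : Char × Nat) : List (List Char) :=
  if g.1 = 'n' then result ++ [List.replicate (g.2 / 2) 'u']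
  else if g.1 = '-' then pvDashLoop result g.2
  else if g.1 ∈ "aiueo".toList then pvVowelLoop g.1 result g.2
  else result

def extract_vowels_alt (word : String) : String :=
  String.mk (PySem.Chars.join [] ((pvGroupby word.toList).foldl pvStepB []))

-- ===== PRECONDITION & SPEC =====
def Spec_extract_vowels (word : String) (out : String) : Prop := out = extract_vowels_alt word
instance (word : String) (out : String) : Decidable (Spec_extract_vowels word out) := by unfold Spec_extract_vowels; infer_instance

-- ===== CLAIM (what is proved, stated in full; the proofs are below) =====
def Claim_equal_extract_vowels : Prop := ∀ (word : String), Dom_extract_vowels word → Spec_extract_vowels word (extract_vowels word)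

-- ===== LEMMAS AND PROOFS =====

theorem takeWhile_eq_replicate (c : Char) (xs : List Char) :
    xs.takeWhile (· = c) = List.replicate (xs.takeWhile (· = c)).length c := by
  induction xs with
  | nil => simp
  | cons x t ih =>
    by_cases h : x = c
    · subst h; simpa [List.takeWhile, List.replicate] using ih
    · simp [List.takeWhile, h]

theorem go_dash_run (k : Nat) (rest : List Char) (res : List (List Char)) :
    extract_vowels_go (List.replicate k '-' ++ rest) res
      = extract_vowels_go rest (pvDashLoop res k) := by
  induction k generalizing res with
  | zero => simp [pvDashLoop]
  | succ k ih =>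
    rw [List.replicate_succ, List.cons_append, extract_vowels_go,
      if_neg (by decide : ¬('-' : Char) = 'n'), if_pos rfl]
    exact ih _

theorem go_vowel_run (c : Char) (hn : c ≠ 'n') (hd : c ≠ '-') (hv : c ∈ "aiueo".toList)
    (k : Nat) (rest : List Char) (res : List (List Char)) :
    extract_vowels_go (List.replicate k c ++ rest) res
      = extract_vowels_go rest (pvVowelLoop c res k) := by
  induction k generalizing res with
  | zero => simp [pvVowelLoop]
  | succ k ih =>
    rw [List.replicate_succ, List.cons_append, extract_vowels_go,
      if_neg hn, if_neg hd, if_pos hv]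
    exact ih _

theorem go_skip_run (c : Char) (hn : c ≠ 'n') (hd : c ≠ '-') (hv : c ∉ "aiueo".toList)
    (k : Nat) (rest : List Char) (res : List (List Char)) :
    extract_vowels_go (List.replicate k c ++ rest) res
      = extract_vowels_go rest res := by
  induction k with
  | zero => simp
  | succ k ih =>
    rw [List.replicate_succ, List.cons_append, extract_vowels_go,
      if_neg hn, if_neg hd, if_neg hv]
    exact ih

theorem go_eq_foldl (l : List Char) (res : List (List Char)) :
    extract_vowels_go l res = (pvGroupby l).foldl pvStepB res := by
  induction hn : l.length using Nat.strong_induction_on generalizing l res with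
  | _ n ih =>
  match l with
  | [] => simp [extract_vowels_go, pvGroupby]
  | c :: rest =>
    have hsplit : rest = rest.takeWhile (· = c) ++ rest.dropWhile (· = c) :=
      (List.takeWhile_append_dropWhile).symm
    set k := (rest.takeWhile (· = c)).length with hk
    have hrep : rest.takeWhile (· = c) = List.replicate k c := takeWhile_eq_replicate c rest
    have hlen : (rest.dropWhile (· = c)).length < n := by
      subst hn
      simpa using Nat.lt_succ_of_le (List.length_dropWhile_le _ _)
    rw [pvGroupby, List.foldl_cons]
    by_cases h1 : c = 'n'
    · subst h1
      rw [extract_vowels_go, if_pos rfl]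
      rw [ih _ hlen _ _ rfl]
      rfl
    · by_cases h2 : c = '-'
      · subst h2
        have : ('-' : Char) :: rest
            = List.replicate (k + 1) '-' ++ rest.dropWhile (· = '-') := by
          rw [List.replicate_succ, List.cons_append]
          conv_lhs => rw [hsplit]
          rw [hrep]
        rw [this, go_dash_run, ih _ hlen _ _ rfl]
        simp [pvStepB, ← hk, Nat.add_comm 1 k]
      · have hrun : c :: rest = List.replicate (k + 1) c ++ rest.dropWhile (· = c) := by
          rw [List.replicate_succ, List.cons_append]
          conv_lhs => rw [hsplit]
          rw [hrep]
        by_cases h3 : c ∈ "aiueo".toList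
        · have h3' : c = 'a' ∨ c = 'i' ∨ c = 'u' ∨ c = 'e' ∨ c = 'o' := by simpa using h3
          rw [hrun, go_vowel_run c h1 h2 h3, ih _ hlen _ _ rfl]
          simp [pvStepB, h1, h2, h3', ← hk, Nat.add_comm 1 k]
        · have h3' : ¬(c = 'a' ∨ c = 'i' ∨ c = 'u' ∨ c = 'e' ∨ c = 'o') := by simpa using h3
          rw [hrun, go_skip_run c h1 h2 h3, ih _ hlen _ _ rfl]
          simp [pvStepB, h1, h2, h3']

-- ===== VERDICT (by name: the statement is the Claim_ definition above) =====
theorem extract_vowels_spec : Claim_equal_extract_vowels := by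
  intro word _
  unfold Spec_extract_vowels extract_vowels extract_vowels_alt
  rw [go_eq_foldl]
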